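-- pv_equiv track=rewrite | github.com/botisko/AdventOfCode | 2020/day_04_2020.py | process_list_data
-- ===== SOURCE A (Python) =====
-- def process_list_data(list_data):
--     """
--     Create a list of passports
--     :param list_data: input data
--     :return: processed data
--     """
--     nu_list = list()
--
--     tmp_str = ''
--     for idx, item in enumerate(list_data):
--         if item != '':
--             tmp_str += ' ' + item
--         else:
--             nu_list.append(tmp_str)
--             tmp_str = ''
--
--         if idx == len(list_data) - 1:
--             nu_list.append(tmp_str)
--
--     return nu_list
-- ===== SOURCE B (Python) =====
-- def process_list_data(list_data):
--     """
--     Create a list of passports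
--     :param list_data: input data
--     :return: processed data
--     """
--     if not list_data:
--         return []
--     groups = [[]]
--     for item in list_data:
--         if item == '':
--             groups.append([])
--         else:
--             groups[-1].append(item)
--     return [''.join(' ' + w for w in g) for g in groups]
-- ===== Notes on version B (the rewrite author's own statement) =====
-- stated objective: alternative
-- what changed: A builds the passport strings in a single pass with a running string and an in-loop last-index check; B first partitions the lines into a list of groups split on blanks, then maps each group to ''.join(' '+w for w in g).
import Mathlib
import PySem

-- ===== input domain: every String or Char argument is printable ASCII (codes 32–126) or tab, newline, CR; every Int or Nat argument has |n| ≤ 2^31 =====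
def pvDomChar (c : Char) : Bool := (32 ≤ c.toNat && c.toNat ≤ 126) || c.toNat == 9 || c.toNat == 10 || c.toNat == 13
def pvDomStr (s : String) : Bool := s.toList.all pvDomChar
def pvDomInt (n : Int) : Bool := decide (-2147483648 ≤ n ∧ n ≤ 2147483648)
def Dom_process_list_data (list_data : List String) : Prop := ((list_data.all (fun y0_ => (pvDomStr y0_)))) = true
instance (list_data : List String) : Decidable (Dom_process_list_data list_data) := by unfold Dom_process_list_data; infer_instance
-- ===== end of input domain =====

-- B replaces A's single pass with a running string by a partition-into-groups pass followed by a
-- formatting map (objective: alternative decomposition, same cost; return value only, no mutation).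

-- ===== PORT A =====
def pvAStep (n : Int) (st : List String × String) (p : Int × String) : List String × String :=
  let st1 := if p.2 ≠ "" then (st.1, st.2 ++ (" " ++ p.2)) else (st.1 ++ [st.2], "")
  if p.1 = n - 1 then (st1.1 ++ [st1.2], st1.2) else st1

def process_list_data (list_data : List String) : List String :=
  ((PySem.List.enumerate list_data 0).foldl (pvAStep (list_data.length : Int)) ([], "")).1

-- ===== PORT B =====
-- ''.join(' ' + w for w in g)
def pvFmt (g : List String) : String := String.join (g.map (fun w => " " ++ w))

def pvBStep (gs : List (List String)) (item : String) : List (List String) :=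
  if item = "" then gs ++ [[]]
  else gs.dropLast ++ [(gs.getLast?.getD []) ++ [item]]

def process_list_data_alt (list_data : List String) : List String :=
  if list_data = [] then []
  else (list_data.foldl pvBStep [[]]).map pvFmt

-- ===== PRECONDITION & SPEC =====
def Spec_process_list_data (list_data : List String) (out : List String) : Prop := out = process_list_data_alt list_data
instance (list_data : List String) (out : List String) : Decidable (Spec_process_list_data list_data out) := by unfold Spec_process_list_data; infer_instance

-- ===== CLAIM (what is proved, stated in full; the proofs are below) =====
def Claim_equal_process_list_data : Prop := ∀ (list_data : List String), Dom_process_list_data list_data → Spec_process_list_data list_data (process_list_data list_data)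

-- ===== LEMMAS AND PROOFS =====

-- the list of blank-separated groups, `cur` being the group under construction
def pvGroups : List String → List String → List (List String)
  | cur, [] => [cur]
  | cur, x :: r => if x = "" then cur :: pvGroups [] r else pvGroups (cur ++ [x]) r

def pvMapHead (tmp : String) : List (List String) → List String
  | [] => []
  | c :: cs => (tmp ++ pvFmt c) :: cs.map pvFmt

lemma pvFmt_nil : pvFmt [] = "" := rfl

lemma pvFmt_concat (l : List String) (x : String) :
    pvFmt (l ++ [x]) = pvFmt l ++ (" " ++ x) := by
  unfold pvFmt
  rw [List.map_append]
  unfold String.join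
  rw [List.foldl_append]
  simp [List.foldl]

lemma pvMapHead_empty (gs : List (List String)) : pvMapHead "" gs = gs.map pvFmt := by
  cases gs with
  | nil => rfl
  | cons c cs => simp [pvMapHead, String.empty_append]

lemma pvB_loop (l : List String) (gs : List (List String)) (cur : List String) :
    List.foldl pvBStep (gs ++ [cur]) l = gs ++ pvGroups cur l := by
  induction l generalizing gs cur with
  | nil => simp [pvGroups]
  | cons x r ih =>
    by_cases hx : x = ""
    · subst hx
      show List.foldl pvBStep (pvBStep (gs ++ [cur]) "") r = _
      have : pvBStep (gs ++ [cur]) "" = (gs ++ [cur]) ++ [[]] := by simp [pvBStep]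
      rw [this, ih (gs ++ [cur]) []]
      simp [pvGroups]
    · show List.foldl pvBStep (pvBStep (gs ++ [cur]) x) r = _
      have : pvBStep (gs ++ [cur]) x = gs ++ [cur ++ [x]] := by
        simp [pvBStep, hx]
      rw [this, ih gs (cur ++ [x])]
      simp [pvGroups, hx]

lemma pvA_loop (n : Int) (l : List String) (hl : l ≠ []) :
    ∀ (k : Int), k + l.length = n → ∀ (nu : List String) (tmp : String) (cur : List String),
    (List.foldl (pvAStep n) (nu, tmp ++ pvFmt cur) (PySem.List.enumerate l k)).1
      = nu ++ pvMapHead tmp (pvGroups cur l) := by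
  induction l with
  | nil => exact absurd rfl hl
  | cons x r ih =>
    intro k hk nu tmp cur
    rw [PySem.List.enumerate_cons]
    cases r with
    | nil =>
      have hkn : k = n - 1 := by simp at hk; omega
      by_cases hx : x = ""
      · subst hx
        simp [PySem.List.enumerate_nil, pvAStep, hkn, pvGroups, pvMapHead, pvFmt_nil]
      · simp [PySem.List.enumerate_nil, pvAStep, hx, hkn, pvGroups, pvMapHead,
          ← pvFmt_concat, String.append_assoc]
    | cons y s =>
      have hkn : ¬ (k = n - 1) := by simp at hk ⊢; omega
      have hk' : (k + 1) + (y :: s).length = n := by simp at hk ⊢; omega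
      by_cases hx : x = ""
      · subst hx
        have hstep : pvAStep n (nu, tmp ++ pvFmt cur) ((k : Int), "")
            = (nu ++ [tmp ++ pvFmt cur], "") := by
          simp [pvAStep, hkn]
        rw [List.foldl_cons, hstep]
        have ihs := ih (by simp) (k + 1) hk' (nu ++ [tmp ++ pvFmt cur]) "" []
        rw [show ("" : String) ++ pvFmt [] = "" from rfl] at ihs
        rw [ihs, pvMapHead_empty]
        simp [pvGroups, pvMapHead]
      · have hstep : pvAStep n (nu, tmp ++ pvFmt cur) ((k : Int), x)
            = (nu, tmp ++ pvFmt (cur ++ [x])) := by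
          simp [pvAStep, hx, hkn, pvFmt_concat, String.append_assoc]
        rw [List.foldl_cons, hstep, ih (by simp) (k + 1) hk' nu tmp (cur ++ [x])]
        simp [pvGroups, hx]

-- ===== VERDICT (by name: the statement is the Claim_ definition above) =====
theorem process_list_data_spec : Claim_equal_process_list_data := by
  intro l _
  unfold Spec_process_list_data process_list_data process_list_data_alt
  by_cases hl : l = []
  · subst hl; rfl
  · simp only [hl, if_false]
    have hA := pvA_loop (l.length : Int) l hl 0 (by simp) [] "" []
    have h0 : ("" : String) ++ pvFmt [] = "" := rfl
    rw [h0] at hA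
    rw [hA, pvMapHead_empty]
    have hB := pvB_loop l [] []
    simp only [List.nil_append] at hB
    rw [hB]
    simp
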